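-- pv_equiv track=rewrite | github.com/Aquinastine/cybr-250 | polybius.py | create_keyed_ascii_polybius_grid
-- ===== SOURCE A (Python) =====
-- def create_keyed_ascii_polybius_grid(key=""):
--     all_chars = [chr(i) for i in range(32, 127)]  # Printable ASCII
--     seen = set()
--     ordered_chars = []
--
--     for char in key:
--         if char in all_chars and char not in seen:
--             ordered_chars.append(char)
--             seen.add(char)
--
--     for char in all_chars:
--         if char not in seen:
--             ordered_chars.append(char)
--
--     grid = {}
--     reverse_grid = {}
--     index = 0
--     for row in range(10):
--         for col in range(10):
--             if index < len(ordered_chars):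
--                 code = f"{row}{col}"
--                 grid[ordered_chars[index]] = code
--                 reverse_grid[code] = ordered_chars[index]
--                 index += 1
--
--     return grid, reverse_grid
-- ===== SOURCE B (Python) =====
-- def create_keyed_ascii_polybius_grid(key=""):
--     def rank(c):
--         i = key.find(c)
--         return i if i >= 0 else len(key) + ord(c)
--
--     ordered = sorted((chr(i) for i in range(32, 127)), key=rank)
--     codes = [r + c for r in "0123456789" for c in "0123456789"]
--     return dict(zip(ordered, codes)), dict(zip(codes, ordered))
-- ===== Notes on version B (the rewrite author's own statement) =====
-- stated objective: alternative
-- what changed: B builds no seen-set, no ordered list via two append loops and no nested 10x10 grid loop with a running counter: it sorts the 95 printable chars by a rank function (first index in key via str.find, else len(key)+ord) and builds both dicts by zipping with a precomputed code table.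
import Mathlib
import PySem

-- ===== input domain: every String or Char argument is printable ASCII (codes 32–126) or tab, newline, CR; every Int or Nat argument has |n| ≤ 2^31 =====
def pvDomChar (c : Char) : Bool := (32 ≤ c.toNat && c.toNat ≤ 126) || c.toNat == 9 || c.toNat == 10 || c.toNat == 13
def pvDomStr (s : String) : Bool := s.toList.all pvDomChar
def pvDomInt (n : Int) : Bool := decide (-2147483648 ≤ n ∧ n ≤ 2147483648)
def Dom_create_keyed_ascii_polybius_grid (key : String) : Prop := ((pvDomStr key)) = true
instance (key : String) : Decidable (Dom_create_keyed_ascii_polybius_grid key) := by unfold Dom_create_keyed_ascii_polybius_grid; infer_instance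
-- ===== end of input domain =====

-- B drops the seen-set, the two append loops and the nested 10x10 grid loop: it sorts the
-- printable alphabet by a rank function (first index in key, else len(key)+ord) and zips it
-- with a precomputed code table (objective: alternative algorithm; same return value).

-- ===== PORT A =====
def create_keyed_ascii_polybius_grid (key : String) : (List (String × String)) × (List (String × String)) :=
  let all_chars : List Char := (PySem.List.pyRange 32 127 1).map (fun i => Char.ofNat i.toNat)
  let st1 : PySem.Set Char × List Char :=
    key.toList.foldl (fun s char =>
      if char ∈ all_chars ∧ char ∉ s.1 then (PySem.Set.add s.1 char, s.2 ++ [char]) else s)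
      (PySem.Set.empty, [])
  let seen := st1.1
  let ordered_chars : List Char :=
    all_chars.foldl (fun acc char => if char ∉ seen then acc ++ [char] else acc) st1.2
  let st2 :=
    (PySem.List.pyRange 0 10 1).foldl (fun s row =>
      (PySem.List.pyRange 0 10 1).foldl
        (fun (s : PySem.Dict String String × PySem.Dict String String × Int) col =>
          if s.2.2 < (ordered_chars.length : Int) then
            let code := String.ofList (PySem.Int.toChars row ++ PySem.Int.toChars col)
            let ch := PySem.List.pyGetD ordered_chars s.2.2 ' '
            (s.1.insert (String.ofList [ch]) code, (s.2.1.insert code (String.ofList [ch]), s.2.2 + 1))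
          else s) s)
      (PySem.Dict.empty, (PySem.Dict.empty, (0 : Int)))
  (st2.1.items, st2.2.1.items)

-- ===== PORT B =====
def create_keyed_ascii_polybius_grid_alt (key : String) : (List (String × String)) × (List (String × String)) :=
  let rank : Char → Int := fun c =>
    let i := PySem.Str.find key (String.ofList [c])
    if 0 ≤ i then i else PySem.Str.len key + (c.toNat : Int)
  let ordered : List Char :=
    PySem.List.sorted ((PySem.List.pyRange 32 127 1).map (fun i => Char.ofNat i.toNat)) rank
  let codes : List String :=
    "0123456789".toList.flatMap (fun r => "0123456789".toList.map (fun c => String.ofList [r, c]))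
  let grid :=
    (ordered.zip codes).foldl
      (fun (d : PySem.Dict String String) p => d.insert (String.ofList [p.1]) p.2) PySem.Dict.empty
  let reverse_grid :=
    (codes.zip ordered).foldl
      (fun (d : PySem.Dict String String) p => d.insert p.1 (String.ofList [p.2])) PySem.Dict.empty
  (grid.items, reverse_grid.items)

-- ===== PRECONDITION & SPEC =====
def Spec_create_keyed_ascii_polybius_grid (key : String) (out : (List (String × String)) × (List (String × String))) : Prop := out = create_keyed_ascii_polybius_grid_alt key
instance (key : String) (out : (List (String × String)) × (List (String × String))) : Decidable (Spec_create_keyed_ascii_polybius_grid key out) := by unfold Spec_create_keyed_ascii_polybius_grid; infer_instance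

-- ===== CLAIM (what is proved, stated in full; the proofs are below) =====
def Claim_equal_create_keyed_ascii_polybius_grid : Prop := ∀ (key : String), Dom_create_keyed_ascii_polybius_grid key → Spec_create_keyed_ascii_polybius_grid key (create_keyed_ascii_polybius_grid key)

-- ===== LEMMAS AND PROOFS =====

/-- the printable-ASCII alphabet both programs build -/
def pvAll : List Char := (PySem.List.pyRange 32 127 1).map (fun i => Char.ofNat i.toNat)

/-- B's rank function, named -/
def pvRank (key : String) (c : Char) : Int :=
  let i := PySem.Str.find key (String.ofList [c])
  if 0 ≤ i then i else PySem.Str.len key + (c.toNat : Int)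

/-- B's code table, named -/
def pvCodes : List String :=
  "0123456789".toList.flatMap (fun r => "0123456789".toList.map (fun c => String.ofList [r, c]))

/-- the code string A writes at index i -/
def pvCodeStr (i : Int) : String :=
  String.ofList (PySem.Int.toChars (PySem.Int.floordiv i 10) ++ PySem.Int.toChars (PySem.Int.mod i 10))

/-- A's step of the first (key) loop -/
def pvStep1A (s : PySem.Set Char × List Char) (char : Char) : PySem.Set Char × List Char :=
  if char ∈ pvAll ∧ char ∉ s.1 then (PySem.Set.add s.1 char, s.2 ++ [char]) else s

lemma pairwise_imp_mem {α : Type} {l : List α} {R S : α → α → Prop} (h : l.Pairwise R)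
    (hi : ∀ a ∈ l, ∀ b ∈ l, R a b → S a b) : l.Pairwise S := by
  induction l with
  | nil => exact List.Pairwise.nil
  | cons x t ih =>
    rw [List.pairwise_cons] at h ⊢
    exact ⟨fun b hb => hi x List.mem_cons_self b (List.mem_cons_of_mem _ hb) (h.1 b hb),
      ih h.2 (fun a ha b hb => hi a (List.mem_cons_of_mem _ ha) b (List.mem_cons_of_mem _ hb))⟩

lemma idxOf_le_of_getElem {l : List Char} {c : Char} {n : Nat} (h : n < l.length)
    (hc : l[n] = c) : l.idxOf c ≤ n := by
  have hm : c ∈ l := hc ▸ List.getElem_mem h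
  have ht : c ∈ l.take (n + 1) := List.mem_take_iff_getElem.mpr ⟨n, by omega, hc⟩
  have := (List.mem_take_iff_idxOf_lt hm).mp ht
  omega

/-- key.find(c) for a present single character is its first index -/
lemma find_singleton_of_mem (l : List Char) (c : Char) (h : c ∈ l) :
    PySem.Chars.find l [c] = (l.idxOf c : Int) := by
  have hinf : [c] <:+: l := (List.singleton_infix_iff c l).mpr h
  have h0 : 0 ≤ PySem.Chars.find l [c] := (PySem.Chars.find_nonneg_iff l [c]).mpr hinf
  obtain ⟨hpre, hmin⟩ := PySem.Chars.find_spec h0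
  set n := (PySem.Chars.find l [c]).toNat with hn
  obtain ⟨t, ht⟩ := hpre
  have hlen : n < l.length := by
    have := congrArg List.length ht
    simp [List.length_drop] at this
    omega
  have hgn : l[n] = c := by
    have := List.getElem_cons_drop hlen
    rw [← this] at ht
    simpa using (List.cons.injEq _ _ _ _ ▸ ht) |>.1 |>.symm
  have h1 : l.idxOf c ≤ n := idxOf_le_of_getElem hlen hgn
  have h2 : n ≤ l.idxOf c := by
    by_contra hlt
    rw [Nat.not_le] at hlt
    have hi : l.idxOf c < l.length := List.idxOf_lt_length_of_mem h
    refine hmin (l.idxOf c) hlt ⟨l.drop (l.idxOf c + 1), ?_⟩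
    rw [← List.getElem_cons_drop hi, List.getElem_idxOf hi]
    rfl
  omega

lemma rank_of_mem (key : String) (c : Char) (h : c ∈ key.toList) :
    pvRank key c = (key.toList.idxOf c : Int) := by
  have hf : PySem.Str.find key (String.ofList [c]) = PySem.Chars.find key.toList [c] := by
    simp [PySem.Str.find]
  rw [pvRank, hf, find_singleton_of_mem key.toList c h]
  simp

lemma rank_of_not_mem (key : String) (c : Char) (h : c ∉ key.toList) :
    pvRank key c = (key.toList.length : Int) + (c.toNat : Int) := by
  have hf : PySem.Str.find key (String.ofList [c]) = PySem.Chars.find key.toList [c] := by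
    simp [PySem.Str.find]
  have hnone : PySem.Chars.find key.toList [c] = -1 :=
    (PySem.Chars.find_eq_neg_one_iff key.toList [c]).mpr
      (fun hc => h ((List.singleton_infix_iff c key.toList).mp hc))
  rw [pvRank, hf, hnone]
  simp [PySem.Str.len]

/-- invariant of A's key loop: the list holds exactly the printable chars of the consumed
    prefix, in order of strictly increasing first index in the full key, mirrored by the set -/
lemma loopA_inv (key : List Char) (suf : List Char) : ∀ (pre : List Char), key = pre ++ suf →
    ∀ (seen : PySem.Set Char) (acc : List Char),
    (∀ c, c ∈ seen ↔ c ∈ acc) →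
    (∀ c, c ∈ acc ↔ c ∈ pre ∧ c ∈ pvAll) →
    acc.Pairwise (fun a b => key.idxOf a < key.idxOf b) →
    (∀ c, c ∈ (suf.foldl pvStep1A (seen, acc)).1 ↔ c ∈ (suf.foldl pvStep1A (seen, acc)).2) ∧
    (∀ c, c ∈ (suf.foldl pvStep1A (seen, acc)).2 ↔ c ∈ key ∧ c ∈ pvAll) ∧
    (suf.foldl pvStep1A (seen, acc)).2.Pairwise (fun a b => key.idxOf a < key.idxOf b) := by
  induction suf with
  | nil =>
    intro pre hk seen acc hsa hacc hpw
    refine ⟨hsa, fun c => ?_, hpw⟩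
    simpa [hk] using hacc c
  | cons x t ih =>
    intro pre hk seen acc hsa hacc hpw
    simp only [List.foldl_cons, pvStep1A]
    by_cases hx : x ∈ pvAll ∧ x ∉ seen
    · rw [if_pos hx]
      have hxacc : x ∉ acc := fun hc => hx.2 ((hsa x).mpr hc)
      have hxpre : x ∉ pre := fun hc => hxacc ((hacc x).mpr ⟨hc, hx.1⟩)
      refine ih (pre ++ [x]) (by simp [hk]) _ _ (fun c => ?_) (fun c => ?_) ?_
      · rw [PySem.Set.mem_add, List.mem_append, List.mem_singleton, hsa c]
      · simp only [List.mem_append, List.mem_singleton]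
        constructor
        · rintro (hc | rfl)
          · obtain ⟨h1, h2⟩ := (hacc c).mp hc
            exact ⟨Or.inl h1, h2⟩
          · exact ⟨Or.inr rfl, hx.1⟩
        · rintro ⟨hc | rfl, hp⟩
          · exact Or.inl ((hacc c).mpr ⟨hc, hp⟩)
          · exact Or.inr rfl
      · rw [List.pairwise_append]
        refine ⟨hpw, List.pairwise_singleton _ _, ?_⟩
        intro a ha b hb
        rw [List.mem_singleton] at hb
        subst hb
        have hapre : a ∈ pre := ((hacc a).mp ha).1
        have h1 : key.idxOf a < pre.length := by
          rw [hk, List.idxOf_append_of_mem hapre]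
          exact List.idxOf_lt_length_of_mem hapre
        have h2 : key.idxOf b = pre.length := by
          rw [hk, List.idxOf_append_of_notMem hxpre]
          simp
        omega
    · rw [if_neg hx]
      refine ih (pre ++ [x]) (by simp [hk]) _ _ hsa (fun c => ?_) hpw
      simp only [List.mem_append, List.mem_singleton]
      constructor
      · intro hc
        obtain ⟨h1, h2⟩ := (hacc c).mp hc
        exact ⟨Or.inl h1, h2⟩
      · rintro ⟨hc | rfl, hp⟩
        · exact (hacc c).mpr ⟨hc, hp⟩
        · rcases not_and_or.mp hx with h | h
          · exact absurd hp h
          · rw [not_not] at h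
            exact (hsa c).mp h
      

/-- A's grid step on a flattened (row, col) pair -/
def pvStepA (xs : List Char) (s : PySem.Dict String String × PySem.Dict String String × Int)
    (p : Int × Int) : PySem.Dict String String × PySem.Dict String String × Int :=
  if s.2.2 < (xs.length : Int) then
    let code := String.ofList (PySem.Int.toChars p.1 ++ PySem.Int.toChars p.2)
    let ch := PySem.List.pyGetD xs s.2.2 ' '
    (s.1.insert (String.ofList [ch]) code, (s.2.1.insert code (String.ofList [ch]), s.2.2 + 1))
  else s

/-- the grid loop's pair step on an enumerated element -/
def pvStepB (s : PySem.Dict String String × PySem.Dict String String) (p : Int × Char) :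
    PySem.Dict String String × PySem.Dict String String :=
  (s.1.insert (String.ofList [p.2]) (pvCodeStr p.1), s.2.insert (pvCodeStr p.1) (String.ofList [p.2]))

def pvPair (i : Nat) : Int × Int := (((i / 10 : Nat) : Int), ((i % 10 : Nat) : Int))

lemma foldl_foldl_eq_foldl_pairs {σ : Type} (f : σ → Int × Int → σ) (la lb : List Int) :
    ∀ init : σ, la.foldl (fun s r => lb.foldl (fun s c => f s (r, c)) s) init
      = (la.flatMap (fun r => lb.map (fun c => (r, c)))).foldl f init := by
  induction la with
  | nil => intro init; rfl
  | cons r t ih =>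
    intro init
    simp only [List.foldl_cons, List.flatMap_cons, List.foldl_append, List.foldl_map, ih]

lemma stepA_idle (xs : List Char) (k : Int) (hk : ¬ k < (xs.length : Int)) :
    ∀ (l : List (Int × Int)) (d1 d2 : PySem.Dict String String),
      l.foldl (pvStepA xs) (d1, (d2, k)) = (d1, (d2, k)) := by
  intro l
  induction l with
  | nil => intro d1 d2; rfl
  | cons p t ih => intro d1 d2; simp only [List.foldl_cons, pvStepA, if_neg hk]; exact ih d1 d2

lemma grid_loop_eq (xs : List Char) (hn : xs.length ≤ 100) :
    ∀ (j k : Nat), k + j = 100 → ∀ (d1 d2 : PySem.Dict String String),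
      ((List.range' k j).map pvPair).foldl (pvStepA xs) (d1, (d2, (k : Int)))
        = (((PySem.List.enumerate (xs.drop k) k).foldl pvStepB (d1, d2)).1,
           (((PySem.List.enumerate (xs.drop k) k).foldl pvStepB (d1, d2)).2,
            ((max k xs.length : Nat) : Int))) := by
  intro j
  induction j with
  | zero =>
    intro k hk d1 d2
    have hd : xs.drop k = [] := List.drop_eq_nil_of_le (by omega)
    simp [hd, Nat.max_eq_left (by omega : xs.length ≤ k)]
  | succ j ih =>
    intro k hk d1 d2
    by_cases hlt : k < xs.length
    · have hd : xs.drop k = xs[k] :: xs.drop (k + 1) := List.drop_eq_getElem_cons hlt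
      rw [List.range'_succ, List.map_cons, List.foldl_cons, hd, PySem.List.enumerate_cons,
        List.foldl_cons]
      have hstepA : pvStepA xs (d1, (d2, (k : Int))) (pvPair k)
          = (d1.insert (String.ofList [xs[k]]) (pvCodeStr (k : Int)),
             (d2.insert (pvCodeStr (k : Int)) (String.ofList [xs[k]]), ((k + 1 : Nat) : Int))) := by
        simp only [pvStepA, pvPair, if_pos (by exact_mod_cast hlt : ((k : Int) < (xs.length : Int)))]
        have hget : PySem.List.pyGetD xs ((k : Int)) ' ' = xs[k] := by
          rw [PySem.List.pyGetD_natCast]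
          exact List.getD_eq_getElem xs ' ' hlt
        rw [hget]
        have e1 : PySem.Int.floordiv (k : Int) 10 = ((k / 10 : Nat) : Int) := by
          rw [PySem.Int.floordiv_eq_ediv_of_pos (by norm_num)]; omega
        have e2 : PySem.Int.mod (k : Int) 10 = ((k % 10 : Nat) : Int) := by
          rw [PySem.Int.mod_eq_emod_of_pos (by norm_num)]; omega
        simp only [pvCodeStr, e1, e2]
        norm_num
      have hstepB : pvStepB (d1, d2) ((k : Int), xs[k])
          = (d1.insert (String.ofList [xs[k]]) (pvCodeStr (k : Int)),
             d2.insert (pvCodeStr (k : Int)) (String.ofList [xs[k]])) := rfl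
      rw [hstepA, hstepB]
      have hc : ((k : Int) + 1) = ((k + 1 : Nat) : Int) := by push_cast; ring
      rw [hc, ih (k + 1) (by omega)]
      congr 2
      omega
    · rw [stepA_idle xs (k : Int) (by exact_mod_cast hlt)]
      have hd : xs.drop k = [] := List.drop_eq_nil_of_le (by omega)
      simp [hd, Nat.max_eq_left (by omega : xs.length ≤ k)]

lemma pairs_concrete :
    (PySem.List.pyRange 0 10 1).flatMap (fun r => (PySem.List.pyRange 0 10 1).map (fun c => (r, c)))
      = (List.range' 0 100).map pvPair := by decide

-- the sorted characterization: sorted(printable, rank) is A's key-part ++ remainder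
lemma sorted_eq_ordered (key : String) (kp : List Char)
    (hmem : ∀ c, c ∈ kp ↔ c ∈ key.toList ∧ c ∈ pvAll)
    (hpw : kp.Pairwise (fun a b => key.toList.idxOf a < key.toList.idxOf b)) :
    PySem.List.sorted pvAll (pvRank key) false
      = kp ++ pvAll.filter (fun c => decide (c ∉ kp)) := by
  have hkpnd : kp.Nodup :=
    List.Pairwise.imp (fun {a b} h => fun hab : a = b => by subst hab; omega) hpw
  have hAllnd : pvAll.Nodup := by decide
  have hfilnd : (pvAll.filter (fun c => decide (c ∉ kp))).Nodup := hAllnd.filter _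
  have hdisj : kp.Disjoint (pvAll.filter (fun c => decide (c ∉ kp))) := by
    intro a ha hb
    have hnot := List.of_mem_filter hb
    simp at hnot
    exact hnot ha
  have hnd : (kp ++ pvAll.filter (fun c => decide (c ∉ kp))).Nodup := by
    rw [List.nodup_append]
    exact ⟨hkpnd, hfilnd, fun a ha b hb hab => hdisj ha (hab ▸ hb)⟩
  have hperm : (kp ++ pvAll.filter (fun c => decide (c ∉ kp))).Perm pvAll := by
    refine (List.perm_ext_iff_of_nodup hnd hAllnd).mpr (fun a => ?_)
    simp only [List.mem_append, List.mem_filter, decide_eq_true_eq]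
    constructor
    · rintro (h | ⟨h, _⟩)
      · exact ((hmem a).mp h).2
      · exact h
    · intro h
      by_cases hk : a ∈ kp
      · exact Or.inl hk
      · exact Or.inr ⟨h, hk⟩
  refine PySem.List.sorted_eq_of_perm_of_pairwise_lt _ _ _ hperm ?_
  rw [List.pairwise_append]
  refine ⟨?_, ?_, ?_⟩
  · refine pairwise_imp_mem hpw (fun a ha b hb h => ?_)
    rw [rank_of_mem key a ((hmem a).mp ha).1, rank_of_mem key b ((hmem b).mp hb).1]
    exact_mod_cast h
  · have hord : pvAll.Pairwise (fun a b => a.toNat < b.toNat) := by decide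
    refine pairwise_imp_mem (hord.filter _) (fun a ha b hb h => ?_)
    have hamem := List.mem_filter.mp ha
    have hbmem := List.mem_filter.mp hb
    simp only [decide_eq_true_eq] at hamem hbmem
    have hak : a ∉ key.toList := fun hc => hamem.2 ((hmem a).mpr ⟨hc, hamem.1⟩)
    have hbk : b ∉ key.toList := fun hc => hbmem.2 ((hmem b).mpr ⟨hc, hbmem.1⟩)
    rw [rank_of_not_mem key a hak, rank_of_not_mem key b hbk]
    omega
  · intro a ha b hb
    have hbmem := List.mem_filter.mp hb
    simp only [decide_eq_true_eq] at hbmem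
    have hbk : b ∉ key.toList := fun hc => hbmem.2 ((hmem b).mpr ⟨hc, hbmem.1⟩)
    have hak : a ∈ key.toList := ((hmem a).mp ha).1
    rw [rank_of_mem key a hak, rank_of_not_mem key b hbk]
    have h1 : key.toList.idxOf a < key.toList.length := List.idxOf_lt_length_of_mem hak
    have h2 : (0 : Int) ≤ (b.toNat : Int) := by positivity
    omega


lemma codes_concrete : pvCodes = (List.range' 0 100).map (fun (j : Nat) => pvCodeStr (j : Int)) := by
  decide

/-- zipping with a block of consecutive code strings is mapping the code over the enumeration -/
lemma zip_codes_eq (l : List Char) : ∀ (n m : Nat), l.length ≤ m →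
    l.zip ((List.range' n m).map (fun (j : Nat) => pvCodeStr (j : Int)))
      = (PySem.List.enumerate l (n : Int)).map (fun p => (p.2, pvCodeStr p.1)) := by
  induction l with
  | nil => intro n m _; simp [PySem.List.enumerate_nil]
  | cons x t ih =>
    intro n m hm
    match m with
    | 0 => simp at hm
    | m + 1 =>
      rw [List.range'_succ, List.map_cons, List.zip_cons_cons, PySem.List.enumerate_cons,
        List.map_cons]
      have hc : ((n : Int) + 1) = ((n + 1 : Nat) : Int) := by push_cast; ring
      rw [hc, ih (n + 1) m (by simpa using hm)]

set_option maxRecDepth 8192 in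
lemma pv_core (key : String) :
    (let all_chars : List Char := (PySem.List.pyRange 32 127 1).map (fun i => Char.ofNat i.toNat)
     let st1 : PySem.Set Char × List Char :=
       key.toList.foldl (fun s char =>
         if char ∈ all_chars ∧ char ∉ s.1 then (PySem.Set.add s.1 char, s.2 ++ [char]) else s)
         (PySem.Set.empty, [])
     let seen := st1.1
     let ordered_chars : List Char :=
       all_chars.foldl (fun acc char => if char ∉ seen then acc ++ [char] else acc) st1.2
     let st2 :=
       (PySem.List.pyRange 0 10 1).foldl (fun s row =>
         (PySem.List.pyRange 0 10 1).foldl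
           (fun (s : PySem.Dict String String × PySem.Dict String String × Int) col =>
             if s.2.2 < (ordered_chars.length : Int) then
               let code := String.ofList (PySem.Int.toChars row ++ PySem.Int.toChars col)
               let ch := PySem.List.pyGetD ordered_chars s.2.2 ' '
               (s.1.insert (String.ofList [ch]) code, (s.2.1.insert code (String.ofList [ch]), s.2.2 + 1))
             else s) s)
         (PySem.Dict.empty, (PySem.Dict.empty, (0 : Int)))
     (st2.1.items, st2.2.1.items))
    = (let rank : Char → Int := fun c =>
         let i := PySem.Str.find key (String.ofList [c])
         if 0 ≤ i then i else PySem.Str.len key + (c.toNat : Int)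
       let ordered : List Char :=
         PySem.List.sorted ((PySem.List.pyRange 32 127 1).map (fun i => Char.ofNat i.toNat)) rank
       let codes : List String :=
         "0123456789".toList.flatMap (fun r => "0123456789".toList.map (fun c => String.ofList [r, c]))
       let grid :=
         (ordered.zip codes).foldl
           (fun (d : PySem.Dict String String) p => d.insert (String.ofList [p.1]) p.2) PySem.Dict.empty
       let reverse_grid :=
         (codes.zip ordered).foldl
           (fun (d : PySem.Dict String String) p => d.insert p.1 (String.ofList [p.2])) PySem.Dict.empty
       (grid.items, reverse_grid.items)) := by
  obtain ⟨hsa, hmem, hpw⟩ := loopA_inv key.toList key.toList [] (by simp) PySem.Set.empty []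
    (fun c => by simp [PySem.Set.empty]) (fun c => by simp) List.Pairwise.nil
  dsimp only
  rw [show List.map (fun i => Char.ofNat i.toNat) (PySem.List.pyRange 32 127 1) = pvAll from rfl]
  rw [show (fun (s : PySem.Set Char × List Char) (char : Char) =>
        if char ∈ pvAll ∧ char ∉ s.1 then (PySem.Set.add s.1 char, s.2 ++ [char]) else s)
      = pvStep1A from rfl]
  rw [show (fun c => if 0 ≤ PySem.Str.find key (String.ofList [c])
        then PySem.Str.find key (String.ofList [c])
        else PySem.Str.len key + (c.toNat : Int)) = pvRank key from rfl]
  rw [show ("0123456789".toList.flatMap (fun r => "0123456789".toList.map (fun c => String.ofList [r, c])))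
      = pvCodes from rfl]
  rw [PySem.List.foldl_append_ite_eq_filter]
  have heq : pvAll.filter (fun c => decide (c ∉ (key.toList.foldl pvStep1A (PySem.Set.empty, ([] : List Char))).1))
      = pvAll.filter (fun c => decide (c ∉ (key.toList.foldl pvStep1A (PySem.Set.empty, ([] : List Char))).2)) :=
    List.filter_congr (fun c _ => by rw [decide_eq_decide]; exact not_congr (hsa c))
  rw [heq]
  set kp := (key.toList.foldl pvStep1A (PySem.Set.empty, ([] : List Char))).2 with hkp
  set ordered := kp ++ pvAll.filter (fun c => decide (c ∉ kp)) with hod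
  have hsorted : PySem.List.sorted pvAll (pvRank key) false = ordered :=
    sorted_eq_ordered key kp hmem hpw
  rw [hsorted]
  have hperm : ordered.Perm pvAll := by
    have := PySem.List.sorted_perm pvAll (pvRank key) false
    rwa [hsorted] at this
  have hlen : ordered.length ≤ 100 := by
    rw [hperm.length_eq]
    decide
  -- A's nested grid loop → one fold of pvStepB over the enumeration
  rw [show (fun (s : PySem.Dict String String × PySem.Dict String String × Int) (row : Int) =>
        List.foldl (fun (s : PySem.Dict String String × PySem.Dict String String × Int) (col : Int) =>
          if s.2.2 < (ordered.length : Int) then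
            (s.1.insert (String.ofList [PySem.List.pyGetD ordered s.2.2 ' '])
                (String.ofList (PySem.Int.toChars row ++ PySem.Int.toChars col)),
              s.2.1.insert (String.ofList (PySem.Int.toChars row ++ PySem.Int.toChars col))
                (String.ofList [PySem.List.pyGetD ordered s.2.2 ' ']),
              s.2.2 + 1)
          else s) s (PySem.List.pyRange 0 10 1))
      = (fun s row => List.foldl (fun s col => pvStepA ordered s (row, col)) s
          (PySem.List.pyRange 0 10 1)) from rfl]
  rw [foldl_foldl_eq_foldl_pairs (pvStepA ordered), pairs_concrete]
  have hmain := grid_loop_eq ordered hlen 100 0 rfl PySem.Dict.empty PySem.Dict.empty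
  rw [List.drop_zero, Nat.cast_zero] at hmain
  rw [hmain]
  -- the pair fold splits into two independent folds
  have hsplit : List.foldl pvStepB (PySem.Dict.empty, PySem.Dict.empty) (PySem.List.enumerate ordered 0)
      = (List.foldl (fun (d : PySem.Dict String String) (p : Int × Char) =>
            d.insert (String.ofList [p.2]) (pvCodeStr p.1)) PySem.Dict.empty (PySem.List.enumerate ordered 0),
         List.foldl (fun (d : PySem.Dict String String) (p : Int × Char) =>
            d.insert (pvCodeStr p.1) (String.ofList [p.2])) PySem.Dict.empty (PySem.List.enumerate ordered 0)) :=
    PySem.List.foldl_prod_mk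
      (fun (d : PySem.Dict String String) (p : Int × Char) => d.insert (String.ofList [p.2]) (pvCodeStr p.1))
      (fun (d : PySem.Dict String String) (p : Int × Char) => d.insert (pvCodeStr p.1) (String.ofList [p.2]))
      (PySem.List.enumerate ordered 0) PySem.Dict.empty PySem.Dict.empty
  rw [hsplit]
  -- B's zips are maps over the same enumeration
  have hzip : ordered.zip pvCodes
      = (PySem.List.enumerate ordered (0 : Int)).map (fun p => (p.2, pvCodeStr p.1)) := by
    rw [codes_concrete]
    exact zip_codes_eq ordered 0 100 (by omega)
  have hzip2 : pvCodes.zip ordered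
      = (PySem.List.enumerate ordered (0 : Int)).map (fun p => (pvCodeStr p.1, p.2)) := by
    have hswap : pvCodes.zip ordered = (ordered.zip pvCodes).map Prod.swap := by
      rw [List.zip_swap]
    rw [hswap, hzip, List.map_map]
    rfl
  rw [hzip, hzip2, List.foldl_map, List.foldl_map]

-- ===== VERDICT (by name: the statement is the Claim_ definition above) =====
theorem create_keyed_ascii_polybius_grid_spec : Claim_equal_create_keyed_ascii_polybius_grid := by
  intro key _
  show create_keyed_ascii_polybius_grid key = create_keyed_ascii_polybius_grid_alt key
  exact pv_core key
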